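-- pv_equiv track=rewrite | github.com/andantecode/coding-test | 그래프/숫자고르기_2668.py | bfs
-- ===== SOURCE A (Python) =====
-- from collections import deque
--
-- def bfs(graph: list, start_point: int):
--     visited = set([])
--     queue = deque([start_point])
--
--     while queue:
--         point = queue.popleft()
--
--         if graph[point] not in visited:
--             visited.add(graph[point])
--             queue.append(graph[point])
--
--     return visited
-- ===== SOURCE B (Python) =====
-- def bfs(graph: list, start_point: int):
--     # Unconditional orbit iteration: len(graph) pointer steps always visit the
--     # whole reachable orbit (pigeonhole), so no worklist or repeat test is needed.
--     visited = set()
--     point = start_point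
--     for _ in range(len(graph)):
--         point = graph[point]
--         visited.add(point)
--     return visited
-- ===== Notes on version B (the rewrite author's own statement) =====
-- stated objective: simpler
-- what changed: Replaces the worklist/repeat-detection loop (deque + membership test + early exit) with a fixed count of len(graph) unconditional pointer steps, correct by pigeonhole: after len(graph) steps the orbit has already closed, so its value set is complete.
import Mathlib
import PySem

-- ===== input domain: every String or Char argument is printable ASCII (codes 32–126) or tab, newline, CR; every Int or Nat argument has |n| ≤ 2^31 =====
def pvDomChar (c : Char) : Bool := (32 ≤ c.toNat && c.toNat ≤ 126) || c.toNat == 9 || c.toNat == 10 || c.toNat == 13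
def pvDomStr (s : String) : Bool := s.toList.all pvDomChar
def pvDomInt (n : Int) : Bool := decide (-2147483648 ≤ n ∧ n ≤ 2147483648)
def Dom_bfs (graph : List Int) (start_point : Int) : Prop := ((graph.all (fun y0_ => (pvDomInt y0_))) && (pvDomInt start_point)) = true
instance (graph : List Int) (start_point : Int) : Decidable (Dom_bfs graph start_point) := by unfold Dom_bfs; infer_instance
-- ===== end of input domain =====

-- B replaces A's worklist/repeat-detection loop by graph.length unconditional pointer
-- steps (pigeonhole closes the orbit); objective: simpler.

-- ===== PORT A =====
-- Fuel bounds A's while-loop: each iteration either stops (membership hit, queue then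
-- drains) or adds a fresh element of `graph` to `visited`, so graph.length + 2 steps
-- always suffice; the none/fuel-0 fallbacks are unreachable under Pre_ (Python raises there).
def bfsLoopA (graph : List Int) : Nat → List Int → PySem.Set Int → PySem.Set Int
  | 0, _, visited => visited
  | _ + 1, [], visited => visited
  | fuel + 1, point :: queue, visited =>
      match PySem.List.pyGet? graph point with
      | none => visited
      | some v =>
          if PySem.Set.contains visited v then bfsLoopA graph fuel queue visited
          else bfsLoopA graph fuel (queue ++ [v]) (PySem.Set.add visited v)

def bfs (graph : List Int) (start_point : Int) : List Int :=
  bfsLoopA graph (graph.length + 2) [start_point] PySem.Set.empty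

-- ===== PORT B =====
-- Source B: 'for _ in range(len(graph)): point = graph[point]; visited.add(point)'.
-- The none branch keeps the state; it is unreachable under Pre_ (Python raises there).
def bfs_alt (graph : List Int) (start_point : Int) : List Int :=
  ((List.range graph.length).foldl
    (fun (st : Int × PySem.Set Int) (_ : Nat) =>
      match PySem.List.pyGet? graph st.1 with
      | none => st
      | some v => (v, PySem.Set.add st.2 v))
    (start_point, PySem.Set.empty)).2

-- ===== PRECONDITION & SPEC =====
-- orbit? graph s k = the k-th point of the pointer orbit s, graph[s], graph[graph[s]], …
-- (none once an index was out of range).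
def orbit? (graph : List Int) (s : Int) : Nat → Option Int
  | 0 => some s
  | k + 1 => (orbit? graph s k).bind (PySem.List.pyGet? graph)

-- Pre_: the pointer orbit from start_point is index-valid for graph.length + 1 steps.
-- By pigeonhole this holds exactly when A returns (A raises IndexError otherwise):
-- if the first graph.length + 1 steps are valid, a value has already repeated and A
-- has stopped; if some earlier step is invalid, A reaches it before any repeat.
def Pre_bfs (graph : List Int) (start_point : Int) : Prop :=
  ∀ k : Nat, k ≤ graph.length + 1 → (orbit? graph start_point k).isSome = true

instance (graph : List Int) (start_point : Int) : Decidable (Pre_bfs graph start_point) := by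
  unfold Pre_bfs; infer_instance

def pvWitness_bfs : List Int × Int := ([1, 2, 0, 3], 0)

def Spec_bfs (graph : List Int) (start_point : Int) (out : List Int) : Prop := out = bfs_alt graph start_point
instance (graph : List Int) (start_point : Int) (out : List Int) : Decidable (Spec_bfs graph start_point out) := by unfold Spec_bfs; infer_instance

-- ===== CLAIM (what is proved, stated in full; the proofs are below) =====
def Claim_equal_bfs : Prop := ∀ (graph : List Int) (start_point : Int), Dom_bfs graph start_point → Pre_bfs graph start_point → Spec_bfs graph start_point (bfs graph start_point)

-- ===== LEMMAS AND PROOFS =====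

-- the k-th orbit value (meaningful while orbit? is some)
def orbVal (graph : List Int) (s : Int) (k : Nat) : Int := (orbit? graph s k).getD 0

-- the set of the first m orbit values graph[s], graph[graph[s]], … in insertion order
def orbSet (graph : List Int) (s : Int) : Nat → PySem.Set Int
  | 0 => PySem.Set.empty
  | m + 1 => PySem.Set.add (orbSet graph s m) (orbVal graph s (m + 1))

theorem orbit?_eq_some (graph : List Int) (s : Int) (k : Nat)
    (h : (orbit? graph s k).isSome = true) : orbit? graph s k = some (orbVal graph s k) := by
  unfold orbVal; cases hk : orbit? graph s k <;> simp [hk] at h ⊢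

theorem pyGet_orbVal (graph : List Int) (s : Int) (k : Nat)
    (hk : (orbit? graph s k).isSome = true) (hk1 : (orbit? graph s (k + 1)).isSome = true) :
    PySem.List.pyGet? graph (orbVal graph s k) = some (orbVal graph s (k + 1)) := by
  have h1 := orbit?_eq_some graph s (k + 1) hk1
  rw [show orbit? graph s (k+1) = (orbit? graph s k).bind (PySem.List.pyGet? graph) from rfl,
      orbit?_eq_some graph s k hk] at h1
  simpa using h1

-- value-determinism of the successor map
theorem orbVal_det (graph : List Int) (s : Int) (i j : Nat)
    (hi : (orbit? graph s i).isSome = true) (hi1 : (orbit? graph s (i + 1)).isSome = true)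
    (hj : (orbit? graph s j).isSome = true) (hj1 : (orbit? graph s (j + 1)).isSome = true)
    (hij : orbVal graph s i = orbVal graph s j) :
    orbVal graph s (i + 1) = orbVal graph s (j + 1) := by
  have a := pyGet_orbVal graph s i hi hi1
  have b := pyGet_orbVal graph s j hj hj1
  rw [hij, b] at a
  exact (Option.some_injective _ a).symm

theorem mem_orbSet (graph : List Int) (s : Int) (m : Nat) (x : Int) :
    x ∈ orbSet graph s m ↔ ∃ i, 1 ≤ i ∧ i ≤ m ∧ x = orbVal graph s i := by
  induction m with
  | zero =>
      simp only [orbSet]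
      constructor
      · intro h; cases h
      · rintro ⟨i, h1, h2, _⟩; omega
  | succ m ih =>
      simp only [orbSet, PySem.Set.mem_add, ih]
      constructor
      · rintro (⟨i, h1, h2, h3⟩ | h)
        · exact ⟨i, h1, by omega, h3⟩
        · exact ⟨m + 1, by omega, le_refl _, h⟩
      · rintro ⟨i, h1, h2, h3⟩
        by_cases hc : i ≤ m
        · exact Or.inl ⟨i, h1, hc, h3⟩
        · have : i = m + 1 := by omega
          subst this; exact Or.inr h3

theorem nodup_orbSet (graph : List Int) (s : Int) (m : Nat) : (orbSet graph s m).Nodup := by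
  induction m with
  | zero => simp [orbSet, PySem.Set.empty]
  | succ m ih => exact PySem.Set.nodup_add _ _ ih

theorem orbSet_subset_graph (graph : List Int) (s : Int) (m : Nat)
    (h : ∀ k, k ≤ m → (orbit? graph s k).isSome = true) :
    ∀ x ∈ orbSet graph s m, x ∈ graph := by
  intro x hx
  obtain ⟨i, h1, h2, h3⟩ := (mem_orbSet graph s m x).1 hx
  obtain ⟨i', rfl⟩ : ∃ i', i = i' + 1 := ⟨i - 1, by omega⟩
  have := pyGet_orbVal graph s i' (h i' (by omega)) (h (i' + 1) (by omega))
  rw [h3]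
  exact PySem.List.mem_of_pyGet?_eq_some graph this

-- stabilization: once the next value repeats, the set never grows again and
-- every later next-value is already inside it
theorem orbSet_stab (graph : List Int) (s : Int) (m : Nat)
    (hm : m ≤ graph.length)
    (hpre : Pre_bfs graph s)
    (hrep : orbVal graph s (m + 1) ∈ orbSet graph s m) :
    ∀ d, m + d ≤ graph.length →
      orbSet graph s (m + d) = orbSet graph s m ∧ orbVal graph s (m + d + 1) ∈ orbSet graph s m := by
  intro d
  induction d with
  | zero => intro _; exact ⟨rfl, hrep⟩
  | succ d ih =>
      intro hd
      obtain ⟨heq, hmem⟩ := ih (by omega)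
      have heq' : orbSet graph s (m + d + 1) = orbSet graph s m := by
        show PySem.Set.add (orbSet graph s (m + d)) (orbVal graph s (m + d + 1)) = _
        rw [heq, PySem.Set.add_of_mem hmem]
      refine ⟨heq', ?_⟩
      -- orbVal (m+d+1) = orbVal i for some 1 ≤ i ≤ m; its successor is orbVal (i+1)
      obtain ⟨i, h1, h2, h3⟩ := (mem_orbSet graph s m _).1 hmem
      have hdet : orbVal graph s (m + d + 1 + 1) = orbVal graph s (i + 1) :=
        orbVal_det graph s (m + d + 1) i
          (hpre _ (by omega)) (hpre _ (by omega))
          (hpre _ (by omega)) (hpre _ (by omega)) h3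
      rw [show m + (d + 1) + 1 = m + d + 1 + 1 by omega, hdet]
      by_cases hc : i < m
      · exact (mem_orbSet graph s m _).2 ⟨i + 1, by omega, by omega, rfl⟩
      · have : i = m := by omega
        subst this; exact hrep

-- pigeonhole: a repeat happens within graph.length steps
theorem orbSet_pigeonhole (graph : List Int) (s : Int) (hpre : Pre_bfs graph s) :
    ∃ m, m ≤ graph.length ∧ orbVal graph s (m + 1) ∈ orbSet graph s m := by
  by_contra hcon
  push Not at hcon
  have hlen : ∀ m, m ≤ graph.length + 1 → (orbSet graph s m).length = m := by
    intro m
    induction m with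
    | zero => intro _; rfl
    | succ m ih =>
        intro hm
        have hfresh := hcon m (by omega)
        show (PySem.Set.add (orbSet graph s m) (orbVal graph s (m + 1))).length = m + 1
        rw [PySem.Set.add_of_not_mem hfresh, List.length_append, ih (by omega)]
        rfl
  set L := orbSet graph s (graph.length + 1) with hL
  have hnodup : L.Nodup := nodup_orbSet graph s _
  have hsub : ∀ x ∈ L, x ∈ graph :=
    orbSet_subset_graph graph s _ (fun k hk => hpre k (by omega))
  have hcard : L.toFinset.card = graph.length + 1 := by
    rw [List.toFinset_card_of_nodup hnodup, hlen _ (le_refl _)]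
  have hle : L.toFinset.card ≤ graph.toFinset.card := by
    apply Finset.card_le_card
    intro x hx
    rw [List.mem_toFinset] at hx ⊢
    exact hsub x hx
  have := List.toFinset_card_le graph
  omega

-- contains everything after the (global) repeat point
theorem contains_final (graph : List Int) (s : Int) (hpre : Pre_bfs graph s) :
    orbVal graph s (graph.length + 1) ∈ orbSet graph s graph.length := by
  obtain ⟨m, hm, hrep⟩ := orbSet_pigeonhole graph s hpre
  obtain ⟨heq, hmem⟩ := orbSet_stab graph s m hm hpre hrep (graph.length - m) (by omega)
  rw [show m + (graph.length - m) = graph.length by omega] at heq hmem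
  rw [← heq] at hmem
  exact hmem

theorem bfsLoopA_nil (graph : List Int) (fuel : Nat) (visited : PySem.Set Int) :
    bfsLoopA graph fuel [] visited = visited := by
  cases fuel <;> rfl

-- A's loop from orbit position m computes orbSet graph.length
theorem bfsLoopA_orb (graph : List Int) (s : Int) (hpre : Pre_bfs graph s)
    (fuel m : Nat) (hm : m ≤ graph.length) (hfuel : graph.length + 1 ≤ m + fuel) :
    bfsLoopA graph fuel [orbVal graph s m] (orbSet graph s m) =
      orbSet graph s graph.length := by
  induction fuel generalizing m with
  | zero => omega
  | succ fuel ih =>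
      show (match PySem.List.pyGet? graph (orbVal graph s m) with
        | none => orbSet graph s m
        | some v =>
            if PySem.Set.contains (orbSet graph s m) v then bfsLoopA graph fuel [] (orbSet graph s m)
            else bfsLoopA graph fuel ([] ++ [v]) (PySem.Set.add (orbSet graph s m) v)) = _
      rw [pyGet_orbVal graph s m (hpre m (by omega)) (hpre (m + 1) (by omega))]
      dsimp only
      by_cases hc : orbVal graph s (m + 1) ∈ orbSet graph s m
      · rw [if_pos ((PySem.Set.contains_iff _ _).2 hc), bfsLoopA_nil]
        obtain ⟨heq, _⟩ := orbSet_stab graph s m hm hpre hc (graph.length - m) (by omega)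
        rw [show m + (graph.length - m) = graph.length by omega] at heq
        exact heq.symm
      · have hcb : ¬ ((orbSet graph s m).contains (orbVal graph s (m + 1)) = true) :=
          fun h => hc ((PySem.Set.contains_iff _ _).1 h)
        rw [if_neg hcb, List.nil_append]
        have hmn : m < graph.length := by
          rcases Nat.lt_or_ge m graph.length with h | h
          · exact h
          · have : m = graph.length := by omega
            subst this
            exact absurd (contains_final graph s hpre) hc
        have := ih (m + 1) (by omega) (by omega)
        rw [show PySem.Set.add (orbSet graph s m) (orbVal graph s (m + 1)) = orbSet graph s (m + 1) from rfl]
        exact this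

-- B's fold from the start computes (orbVal m, orbSet m)
theorem foldB_orb (graph : List Int) (s : Int) (hpre : Pre_bfs graph s)
    (m : Nat) (hm : m ≤ graph.length) :
    (List.range m).foldl
      (fun (st : Int × PySem.Set Int) (_ : Nat) =>
        match PySem.List.pyGet? graph st.1 with
        | none => st
        | some v => (v, PySem.Set.add st.2 v))
      (s, PySem.Set.empty) = (orbVal graph s m, orbSet graph s m) := by
  induction m with
  | zero => rfl
  | succ m ih =>
      rw [List.range_succ, List.foldl_append, ih (by omega)]
      simp only [List.foldl_cons, List.foldl_nil]
      rw [pyGet_orbVal graph s m (hpre m (by omega)) (hpre (m + 1) (by omega))]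
      rfl

-- ===== VERDICT (by name: the statement is the Claim_ definition above) =====
theorem bfs_spec : Claim_equal_bfs := by
  intro graph s _ hpre
  unfold Spec_bfs bfs bfs_alt
  rw [foldB_orb graph s hpre graph.length (le_refl _)]
  have h0 : orbVal graph s 0 = s := rfl
  have := bfsLoopA_orb graph s hpre (graph.length + 2) 0 (by omega) (by omega)
  rw [h0] at this
  exact this
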